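-- pv_equiv track=rewrite | github.com/jcraig949jfi/Prometheus | noesis/the_maths/fibonacci_variations.py | fibonacci_divisibility_order
-- ===== SOURCE A (Python) =====
-- def fibonacci_divisibility_order(x):
--     """Find smallest k such that F(k) is divisible by n. n=int(x[0]). Input: array. Output: integer."""
--     n = int(abs(x[0]))
--     if n <= 1:
--         return int(n)
--     # alpha(n) = rank of apparition / entry point
--     a, b = 0, 1
--     for k in range(1, 10000):
--         a, b = b, (a + b)
--         if a % n == 0:
--             return int(k)
--     return -1  # not found within limit
-- ===== SOURCE B (Python) =====
-- def fibonacci_divisibility_order(x):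
--     """Find smallest k such that F(k) is divisible by n. n=int(x[0]). Input: array. Output: integer."""
--     n = abs(int(x[0]))
--     if n <= 1:
--         return n
--     # stage 1: table of F(1)..F(9999) reduced modulo n
--     table = [0] * 9999
--     a, b = 1, 1
--     for i in range(9999):
--         table[i] = a
--         a, b = b, (a + b) % n
--     # stage 2: position of the first zero residue
--     if 0 in table:
--         return 1 + table.index(0)
--     return -1
-- ===== Notes on version B (the rewrite author's own statement) =====
-- stated objective: faster
-- what changed: B is two staged passes instead of A's fused search loop: it first builds the table of F(1)..F(9999) reduced modulo n (intermediates stay below n instead of growing to thousands of digits), then returns 1 + the position of the first zero residue via a membership test and index search, with no early return inside the Fibonacci iteration.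
-- outside the precondition, e.g. on fibonacci_divisibility_order([]): A raises IndexError, B raises IndexError
import Mathlib
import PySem

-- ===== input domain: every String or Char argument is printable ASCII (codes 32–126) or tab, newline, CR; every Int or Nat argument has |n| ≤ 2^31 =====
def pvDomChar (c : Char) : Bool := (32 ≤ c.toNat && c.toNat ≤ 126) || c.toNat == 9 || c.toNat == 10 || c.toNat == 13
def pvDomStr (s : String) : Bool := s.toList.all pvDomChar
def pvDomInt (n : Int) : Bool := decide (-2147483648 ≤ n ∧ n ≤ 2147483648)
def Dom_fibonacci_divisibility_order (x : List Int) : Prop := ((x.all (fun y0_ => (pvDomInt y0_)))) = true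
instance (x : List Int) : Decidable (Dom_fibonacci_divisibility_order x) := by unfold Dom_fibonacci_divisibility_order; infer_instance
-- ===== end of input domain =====

-- B replaces A's fused search loop (early return inside the Fibonacci iteration over full-size
-- integers) by two stages: build the table of F(1)..F(9999) reduced mod n, then locate the first
-- zero residue by a positional search (objective: faster — mod-reduced intermediates stay small).

-- ===== PORT A =====
-- the `for k in range(1, 10000)` loop of A: a, b = b, a + b; return k when a % n == 0
def fdoLoopA (n : Int) : List Int → Int → Int → Int
  | [], _, _ => -1
  | k :: ks, a, b =>
    let a' := b
    let b' := a + b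
    if PySem.Int.mod a' n = 0 then k else fdoLoopA n ks a' b'

def fibonacci_divisibility_order (x : List Int) : Int :=
  let n := |x.headD 0|            -- int(abs(x[0])); x = [] raises IndexError, excluded by Pre_
  if n ≤ 1 then n
  else fdoLoopA n (PySem.List.pyRange 1 10000 1) 0 1

-- ===== PORT B =====
-- stage 1 of B: the table [F(1) mod n, …, F(m) mod n] built from the reduced pair (a, b)
def fdoTab (n : Int) : Nat → Int → Int → List Int
  | 0, _, _ => []
  | m + 1, a, b => a :: fdoTab n m b (PySem.Int.mod (a + b) n)

def fibonacci_divisibility_order_alt (x : List Int) : Int :=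
  let n := |x.headD 0|
  if n ≤ 1 then n
  else
    let table := fdoTab n 9999 1 1
    -- stage 2 of B: `0 in table` then `table.index(0)`
    if 0 ∈ table then 1 + (((PySem.List.index? table 0).getD 0 : Nat) : Int)
    else -1

-- ===== PRECONDITION & SPEC =====
-- Pre_ excludes only the empty list, on which A raises IndexError at x[0]
def Pre_fibonacci_divisibility_order (x : List Int) : Prop := x ≠ []
instance (x : List Int) : Decidable (Pre_fibonacci_divisibility_order x) := by
  unfold Pre_fibonacci_divisibility_order; infer_instance
def pvWitness_fibonacci_divisibility_order : List Int := [6]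

def Spec_fibonacci_divisibility_order (x : List Int) (out : Int) : Prop := out = fibonacci_divisibility_order_alt x
instance (x : List Int) (out : Int) : Decidable (Spec_fibonacci_divisibility_order x out) := by unfold Spec_fibonacci_divisibility_order; infer_instance

-- ===== CLAIM (what is proved, stated in full; the proofs are below) =====
def Claim_equal_fibonacci_divisibility_order : Prop := ∀ (x : List Int), Dom_fibonacci_divisibility_order x → Pre_fibonacci_divisibility_order x → Spec_fibonacci_divisibility_order x (fibonacci_divisibility_order x)

-- ===== LEMMAS AND PROOFS =====

-- the position-of-first-zero reading of B's stage 2, used only inside the proofs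
def fdoFind (k : Int) (t : List Int) : Int :=
  match PySem.List.index? t 0 with
  | some i => k + (i : Int)
  | none => -1

lemma fdoFind_cons_zero (k : Int) (t : List Int) : fdoFind k ((0 : Int) :: t) = k := by
  unfold fdoFind
  rw [PySem.List.index?_cons_self]
  simp

lemma fdoFind_cons_ne {c : Int} (h : c ≠ 0) (k : Int) (t : List Int) :
    fdoFind k (c :: t) = fdoFind (k + 1) t := by
  unfold fdoFind
  rw [PySem.List.index?_cons_of_ne _ h]
  cases PySem.List.index? t 0 with
  | none => rfl
  | some i => simp; ring

-- the bridge: A's fused loop on the suffix range(k, 10000) with big-integer state (a, b)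
-- equals 'first zero position, offset k' over B's residue table seeded with (b mod n, (a+b) mod n)
lemma fdoLoop_eq (n : Int) (hn : 2 ≤ n) :
    ∀ (m : Nat) (k a b : Int), 9999 - k = (m : Int) →
    fdoLoopA n (PySem.List.pyRange k 10000 1) a b
      = fdoFind k (fdoTab n (m + 1) (PySem.Int.mod b n) (PySem.Int.mod (a + b) n)) := by
  intro m
  induction m with
  | zero =>
    intro k a b hk
    have hk' : k = 9999 := by omega
    subst hk'
    rw [PySem.List.pyRange_one_cons (by norm_num),
        PySem.List.pyRange_one_eq_nil (by norm_num)]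
    simp only [fdoLoopA]
    rw [fdoTab]
    by_cases h1 : PySem.Int.mod b n = 0
    · rw [if_pos h1, h1, fdoFind_cons_zero]
    · rw [if_neg h1, fdoFind_cons_ne h1]
      rfl
  | succ m ih =>
    intro k a b hk
    have hklt : k < 10000 := by omega
    rw [PySem.List.pyRange_one_cons hklt]
    simp only [fdoLoopA]
    rw [fdoTab]
    have hmod : ∀ y : Int, PySem.Int.mod y n = y % n :=
      fun y => PySem.Int.mod_eq_emod_of_pos (by omega)
    have hseed : PySem.Int.mod (PySem.Int.mod b n + PySem.Int.mod (a + b) n) n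
        = PySem.Int.mod (b + (a + b)) n := by
      simp only [hmod]
      rw [Int.add_emod b (a + b)]
    by_cases h1 : PySem.Int.mod b n = 0
    · rw [if_pos h1, h1, fdoFind_cons_zero]
    · rw [if_neg h1, fdoFind_cons_ne h1, hseed]
      exact ih (k + 1) b (a + b) (by omega)

-- B's if/index formulation equals the match formulation
lemma fdoFind_eq (t : List Int) :
    (if 0 ∈ t then 1 + (((PySem.List.index? t 0).getD 0 : Nat) : Int) else -1) = fdoFind 1 t := by
  unfold fdoFind
  by_cases h : (0 : Int) ∈ t
  · cases hidx : PySem.List.index? t 0 with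
    | none => exact absurd ((PySem.List.index?_eq_none_iff t 0).mp hidx) (by simpa using h)
    | some i => simp [h]
  · rw [(PySem.List.index?_eq_none_iff t 0).mpr h]
    simp [h]

-- ===== VERDICT (by name: the statement is the Claim_ definition above) =====
theorem fibonacci_divisibility_order_spec : Claim_equal_fibonacci_divisibility_order := by
  intro x _ hpre
  unfold Spec_fibonacci_divisibility_order fibonacci_divisibility_order fibonacci_divisibility_order_alt
  set n := |x.headD 0| with hn
  by_cases h : n ≤ 1
  · simp [h]
  · simp only [h, if_false]
    have hn2 : 2 ≤ n := by omega
    rw [fdoLoop_eq n hn2 9998 1 0 1 (by norm_num)]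
    have h1 : PySem.Int.mod 1 n = 1 := by
      rw [PySem.Int.mod_eq_emod_of_pos (by omega : (0:Int) < n)]
      exact Int.emod_eq_of_lt (by omega) (by omega)
    rw [fdoFind_eq]
    rw [show (0 : Int) + 1 = 1 by ring, h1]
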